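-- pv_equiv track=rewrite | github.com/rafaelvc/AlgoDojo | smallest_ranges.py | smallest_ranges
-- ===== SOURCE A (Python) =====
-- def smallest_ranges(arr):
--     if len(arr) == 0:
--         return []
--     ranges = []
--     next_expected = arr[0] + 1
--     cur_range = arr[0]
--     for i in range(1,len(arr)):
--         if arr[i] != next_expected:
--             if cur_range == arr[i-1]:
--                 ranges.append(f'{cur_range}')
--             else:
--                 ranges.append(f'{cur_range}->{arr[i-1]}')
--             cur_range = arr[i]
--             next_expected = arr[i] + 1
--         else:
--             next_expected += 1
--     if arr[len(arr)-1] == cur_range: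
--         ranges.append(f'{cur_range}')
--     else:
--         ranges.append(f'{cur_range}->{arr[len(arr)-1]}')
--     return ranges
-- ===== SOURCE B (Python) =====
-- def smallest_ranges(arr):
--     out = []
--     i = 0
--     n = len(arr)
--     while i < n:
--         k = 1
--         while i + k < n and arr[i + k] == arr[i] + k:
--             k += 1
--         out.append(str(arr[i]) if k == 1 else f'{arr[i]}->{arr[i] + k - 1}')
--         i += k
--     return out
-- ===== Notes on version B (the rewrite author's own statement) =====
-- stated objective: alternative
-- what changed: A's single element-wise pass maintaining next_expected/cur_range state with a trailing emit is replaced by a run-jumping nested loop: for each run start i an inner scan measures the run length k by comparing arr[i+k] against the anchor arr[i]+k, the run's end value is computed arithmetically as arr[i]+k-1 instead of read back from the array, and i jumps by k.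
import Mathlib
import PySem

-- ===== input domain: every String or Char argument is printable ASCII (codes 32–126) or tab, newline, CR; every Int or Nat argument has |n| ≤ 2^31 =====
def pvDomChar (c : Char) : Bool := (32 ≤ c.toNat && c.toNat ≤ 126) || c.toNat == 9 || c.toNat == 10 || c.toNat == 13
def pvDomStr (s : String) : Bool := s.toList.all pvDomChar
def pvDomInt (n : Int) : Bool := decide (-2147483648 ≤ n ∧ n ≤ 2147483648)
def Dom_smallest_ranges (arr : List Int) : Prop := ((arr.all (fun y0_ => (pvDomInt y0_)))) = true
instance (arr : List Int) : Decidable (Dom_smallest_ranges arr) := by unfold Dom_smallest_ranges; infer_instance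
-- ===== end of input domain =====

-- B replaces A's element-wise state machine (next_expected / cur_range, trailing emit) by a
-- run-jumping nested loop: an inner scan measures each run's length k against the anchor
-- arr[i]+k, the end value is computed as arr[i]+k-1, and i jumps by k (objective: alternative).

-- ===== PORT A =====
-- loop body of A's 'for i in range(1, len(arr))', state = (ranges, next_expected, cur_range)
def pvLoopA (arr : List Int) (st : List String × Int × Int) (i : Int) :
    List String × Int × Int :=
  let ranges := st.1
  let next_expected := st.2.1
  let cur_range := st.2.2
  if PySem.List.pyGetD arr i 0 ≠ next_expected then
    (ranges ++ [if cur_range == PySem.List.pyGetD arr (i - 1) 0 then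
                  PySem.Int.toStr cur_range
                else
                  PySem.Int.toStr cur_range ++ "->" ++ PySem.Int.toStr (PySem.List.pyGetD arr (i - 1) 0)],
     PySem.List.pyGetD arr i 0 + 1, PySem.List.pyGetD arr i 0)
  else
    (ranges, next_expected + 1, cur_range)

def smallest_ranges (arr : List Int) : List String :=
  if PySem.List.len arr == 0 then []
  else
    let st := (PySem.List.pyRange 1 (PySem.List.len arr) 1).foldl (pvLoopA arr)
      ([], PySem.List.pyGetD arr 0 0 + 1, PySem.List.pyGetD arr 0 0)
    let ranges := st.1
    let cur_range := st.2.2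
    if PySem.List.pyGetD arr (PySem.List.len arr - 1) 0 == cur_range then
      ranges ++ [PySem.Int.toStr cur_range]
    else
      ranges ++ [PySem.Int.toStr cur_range ++ "->" ++ PySem.Int.toStr (PySem.List.pyGetD arr (PySem.List.len arr - 1) 0)]

-- ===== PORT B =====
-- B's inner loop 'while i + k < n and arr[i + k] == arr[i] + k: k += 1'.
-- The fuel argument only makes the loop total: it never runs out (n iterations suffice).
def pvRunB (arr : List Int) (i : Int) : Nat → Nat → Nat
  | 0, k => k
  | f + 1, k =>
    if i + k < PySem.List.len arr ∧
        PySem.List.pyGetD arr (i + k) 0 = PySem.List.pyGetD arr i 0 + k then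
      pvRunB arr i f (k + 1)
    else k

-- B's outer loop 'while i < n: … i += k', carrying (i, out); fuel as above.
-- Python's local k = pvRunB arr i arr.length 1, written out at each use.
def pvOuterB (arr : List Int) : Nat → Int → List String → List String
  | 0, _, out => out
  | f + 1, i, out =>
    if i < PySem.List.len arr then
      pvOuterB arr f (i + pvRunB arr i arr.length 1)
        (out ++ [if pvRunB arr i arr.length 1 == 1 then
                   PySem.Int.toStr (PySem.List.pyGetD arr i 0)
                 else PySem.Int.toStr (PySem.List.pyGetD arr i 0) ++ "->" ++
                      PySem.Int.toStr (PySem.List.pyGetD arr i 0 + pvRunB arr i arr.length 1 - 1)])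
    else out

def smallest_ranges_alt (arr : List Int) : List String :=
  pvOuterB arr (arr.length + 1) 0 []

-- ===== PRECONDITION & SPEC =====
def Spec_smallest_ranges (arr : List Int) (out : List String) : Prop := out = smallest_ranges_alt arr
instance (arr : List Int) (out : List String) : Decidable (Spec_smallest_ranges arr out) := by unfold Spec_smallest_ranges; infer_instance

-- ===== CLAIM (what is proved, stated in full; the proofs are below) =====
def Claim_equal_smallest_ranges : Prop := ∀ (arr : List Int), Dom_smallest_ranges arr → Spec_smallest_ranges arr (smallest_ranges arr)

-- ===== LEMMAS AND PROOFS =====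

-- last element of a :: tl
def pvLast : Int → List Int → Int
  | a, [] => a
  | _, x :: tl => pvLast x tl

-- list of adjacent pairs (arr[i-1], arr[i]) of a :: tl
def pvPairs : Int → List Int → List (Int × Int)
  | _, [] => []
  | a, x :: tl => (a, x) :: pvPairs x tl

-- A's loop body, re-expressed on an adjacent pair (prev, x) instead of an index
def pvPairStepA (st : List String × Int × Int) (p : Int × Int) :
    List String × Int × Int :=
  if p.2 ≠ st.2.1 then
    (st.1 ++ [if st.2.2 == p.1 then PySem.Int.toStr st.2.2
              else PySem.Int.toStr st.2.2 ++ "->" ++ PySem.Int.toStr p.1],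
     p.2 + 1, p.2)
  else
    (st.1, st.2.1 + 1, st.2.2)

-- format one (start, end) run the way both programs print it
def pvFmt (p : Int × Int) : String :=
  if p.1 == p.2 then PySem.Int.toStr p.1
  else PySem.Int.toStr p.1 ++ "->" ++ PySem.Int.toStr p.2

-- A's semantics as a suffix recursion: current run started at cur, previous element is a
def pvF (cur a : Int) : List Int → List String
  | [] => [pvFmt (cur, a)]
  | x :: tl => if x = a + 1 then pvF cur x tl else pvFmt (cur, a) :: pvF x x tl

-- B's inner loop as a suffix recursion: k elements already matched, tl follows them
def pvRun (a0 : Int) : Nat → List Int → Nat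
  | k, [] => k
  | k, x :: tl => if x = a0 + k then pvRun a0 (k + 1) tl else k

lemma pvRun_ge (a0 : Int) : ∀ (tl : List Int) (k : Nat), k ≤ pvRun a0 k tl := by
  intro tl
  induction tl with
  | nil => intro k; simp [pvRun]
  | cons x tl ih =>
    intro k
    simp only [pvRun]
    split
    · exact le_trans (Nat.le_succ k) (ih (k + 1))
    · exact le_refl k

-- B's semantics as a suffix recursion over runs
def pvAltS : List Int → List String
  | [] => []
  | a :: tl =>
    (if pvRun a 1 tl == 1 then PySem.Int.toStr a
     else PySem.Int.toStr a ++ "->" ++ PySem.Int.toStr (a + (pvRun a 1 tl : Int) - 1))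
    :: pvAltS (tl.drop (pvRun a 1 tl - 1))
termination_by arr => arr.length
decreasing_by
  simp only [List.length_drop, List.length_cons]
  omega

lemma pvAltS_cons (a : Int) (tl : List Int) :
    pvAltS (a :: tl)
      = (if pvRun a 1 tl == 1 then PySem.Int.toStr a
         else PySem.Int.toStr a ++ "->" ++ PySem.Int.toStr (a + (pvRun a 1 tl : Int) - 1))
        :: pvAltS (tl.drop (pvRun a 1 tl - 1)) := by
  rw [pvAltS]

lemma pvLast_getD (tl : List Int) : ∀ a : Int, (a :: tl).getD tl.length 0 = pvLast a tl := by
  induction tl with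
  | nil => intro a; rfl
  | cons x tl ih => intro a; simpa [pvLast] using ih x

lemma pvPairs_snoc (b : Int) (zs : List Int) : ∀ a : Int,
    pvPairs a (zs ++ [b]) = pvPairs a zs ++ [(pvLast a zs, b)] := by
  induction zs with
  | nil => intro a; simp [pvPairs, pvLast]
  | cons x tl ih => intro a; simp [pvPairs, pvLast, ih x]

lemma pvGetD_append_left (l l' : List Int) (j : Int) (h0 : 0 ≤ j) (h1 : j < l.length) :
    PySem.List.pyGetD (l ++ l') j 0 = PySem.List.pyGetD l j 0 := by
  rw [PySem.List.pyGetD_eq_getElem (l ++ l') 0 h0 (by simp; omega),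
      PySem.List.pyGetD_eq_getElem l 0 h0 h1]
  exact List.getElem_append_left (by omega)

-- A's indexed loop equals the fold of pvPairStepA over the adjacent pairs
lemma pvBridge (a : Int) (tl : List Int) : ∀ st0 : List String × Int × Int,
    (PySem.List.pyRange 1 (PySem.List.len (a :: tl)) 1).foldl (pvLoopA (a :: tl)) st0
      = (pvPairs a tl).foldl pvPairStepA st0 := by
  induction tl using List.reverseRecOn with
  | nil =>
    intro st0
    rw [show PySem.List.len [a] = 1 from by simp,
        PySem.List.pyRange_one_eq_nil (le_refl 1)]
    rfl
  | append_singleton zs b ih =>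
    intro st0
    have hlen : PySem.List.len (a :: (zs ++ [b])) = PySem.List.len (a :: zs) + 1 := by
      simp
    have hn : (1 : Int) ≤ PySem.List.len (a :: zs) := by simp
    rw [hlen, PySem.List.pyRange_one_succ_right hn, List.foldl_append]
    have hcongr : (PySem.List.pyRange 1 (PySem.List.len (a :: zs)) 1).foldl
        (pvLoopA (a :: (zs ++ [b]))) st0
        = (PySem.List.pyRange 1 (PySem.List.len (a :: zs)) 1).foldl (pvLoopA (a :: zs)) st0 := by
      apply PySem.List.foldl_congr_mem
      intro acc i hi
      rw [PySem.List.mem_pyRange_one] at hi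
      simp only [PySem.List.len_eq, List.length_cons] at hi
      have e1 : PySem.List.pyGetD (a :: (zs ++ [b])) i 0 = PySem.List.pyGetD (a :: zs) i 0 := by
        rw [show a :: (zs ++ [b]) = (a :: zs) ++ [b] from rfl]
        exact pvGetD_append_left _ _ i (by omega) (by simp; omega)
      have e2 : PySem.List.pyGetD (a :: (zs ++ [b])) (i - 1) 0
          = PySem.List.pyGetD (a :: zs) (i - 1) 0 := by
        rw [show a :: (zs ++ [b]) = (a :: zs) ++ [b] from rfl]
        exact pvGetD_append_left _ _ (i - 1) (by omega) (by simp; omega)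
      simp only [pvLoopA, e1, e2]
    rw [hcongr, ih st0, pvPairs_snoc b zs a, List.foldl_append]
    have eb : PySem.List.pyGetD (a :: (zs ++ [b])) (PySem.List.len (a :: zs)) 0 = b := by
      rw [show a :: (zs ++ [b]) = (a :: zs) ++ [b] from rfl]
      rw [show PySem.List.len (a :: zs) = ((zs.length + 1 : Nat) : Int) from by simp]
      rw [PySem.List.pyGetD_natCast]
      simp [List.getD]
    have el : PySem.List.pyGetD (a :: (zs ++ [b])) (PySem.List.len (a :: zs) - 1) 0
        = pvLast a zs := by
      rw [show a :: (zs ++ [b]) = (a :: zs) ++ [b] from rfl]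
      rw [pvGetD_append_left _ _ _ (by simp) (by simp)]
      rw [show PySem.List.len (a :: zs) - 1 = ((zs.length : Nat) : Int) from by simp]
      rw [PySem.List.pyGetD_natCast]
      exact pvLast_getD zs a
    simp only [List.foldl_cons, List.foldl_nil, pvLoopA, pvPairStepA, eb, el]

-- A's pair fold plus its final append equals the suffix recursion pvF
lemma pvFoldF (tl : List Int) : ∀ (a cur : Int) (acc : List String),
    (let st := (pvPairs a tl).foldl pvPairStepA (acc, a + 1, cur)
     st.1 ++ [pvFmt (st.2.2, pvLast a tl)])
      = acc ++ pvF cur a tl := by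
  induction tl with
  | nil => intro a cur acc; simp [pvPairs, pvLast, pvF]
  | cons x tl ih =>
    intro a cur acc
    simp only [pvPairs, pvLast, List.foldl_cons, pvF]
    by_cases hx : x = a + 1
    · have h1 : pvPairStepA (acc, a + 1, cur) (a, x) = (acc, x + 1, cur) := by
        simp [pvPairStepA, hx]
      rw [h1, if_pos hx]
      exact ih x cur acc
    · have h1 : pvPairStepA (acc, a + 1, cur) (a, x)
          = (acc ++ [pvFmt (cur, a)], x + 1, x) := by
        simp [pvPairStepA, pvFmt, hx]
      rw [h1, if_neg hx]
      rw [ih x x (acc ++ [pvFmt (cur, a)])]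
      simp

-- basic facts about a cons-shaped drop
lemma pvDropCons (arr : List Int) (n : Nat) (x : Int) (r : List Int)
    (h : arr.drop n = x :: r) :
    arr.getD n 0 = x ∧ arr.drop (n + 1) = r ∧ n < arr.length := by
  have hlt : n < arr.length := by
    have := congrArg List.length h
    simp at this
    omega
  have hget : arr[n]? = some x := by
    have h0 : (arr.drop n)[0]? = arr[n + 0]? := List.getElem?_drop
    rw [h] at h0
    simpa using h0.symm
  refine ⟨by simp [List.getD, hget], ?_, hlt⟩
  have h1 : (arr.drop n).drop 1 = arr.drop (n + 1) := by
    rw [List.drop_drop]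
  rw [← h1, h]
  rfl

-- the inner loop only increases k
lemma pvRunB_ge (arr : List Int) (i : Int) : ∀ (f k : Nat), k ≤ pvRunB arr i f k := by
  intro f
  induction f with
  | zero => intro k; simp [pvRunB]
  | succ f ih =>
    intro k
    simp only [pvRunB]
    split
    · exact le_trans (Nat.le_succ k) (ih (k + 1))
    · exact le_refl k

-- B's indexed inner loop equals the suffix recursion pvRun (fuel never runs out)
lemma pvRunB_eq (arr : List Int) (m : Nat) (a : Int) (tl : List Int)
    (hd : arr.drop m = a :: tl) :
    ∀ (f k : Nat), arr.length ≤ m + k + f →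
      pvRunB arr (m : Int) f k = pvRun a k (arr.drop (m + k)) := by
  obtain ⟨ha, -, hm⟩ := pvDropCons arr m a tl hd
  intro f
  induction f with
  | zero =>
    intro k hf
    rw [List.drop_eq_nil_of_le (by omega)]
    simp [pvRunB, pvRun]
  | succ f ih =>
    intro k hf
    cases hdk : arr.drop (m + k) with
    | nil =>
      have hlen : arr.length ≤ m + k := by
        have := congrArg List.length hdk
        simp at this
        omega
      simp only [pvRunB, pvRun]
      rw [if_neg (by simp only [PySem.List.len_eq]; push_cast; omega)]
    | cons x r =>
      obtain ⟨hx, hr, hlt⟩ := pvDropCons arr (m + k) x r hdk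
      have h1 : (m : Int) + k < PySem.List.len arr := by
        simp only [PySem.List.len_eq]; push_cast; omega
      have hgk : PySem.List.pyGetD arr ((m : Int) + k) 0 = x := by
        rw [show (m : Int) + k = ((m + k : Nat) : Int) from by push_cast; ring,
            PySem.List.pyGetD_natCast, hx]
      have hgm : PySem.List.pyGetD arr (m : Int) 0 = a := by
        rw [PySem.List.pyGetD_natCast]; exact ha
      by_cases hxa : x = a + k
      · simp only [pvRunB, pvRun]
        rw [if_pos ⟨h1, by rw [hgk, hgm]; exact hxa⟩,
            ih (k + 1) (by omega),
            show m + (k + 1) = (m + k) + 1 from by ring, hr, if_pos hxa]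
      · simp only [pvRunB, pvRun]
        rw [if_neg (by intro hc; exact hxa (by rw [hgk, hgm] at hc; exact hc.2)),
            if_neg hxa]

-- B's indexed outer loop equals the suffix recursion pvAltS (fuel never runs out)
lemma pvOuterB_eq (arr : List Int) :
    ∀ (f m : Nat) (out : List String), arr.length - m < f →
      pvOuterB arr f (m : Int) out = out ++ pvAltS (arr.drop m) := by
  intro f
  induction f with
  | zero => intro m out hlt; exact absurd hlt (Nat.not_lt_zero _)
  | succ f ih =>
    intro m out hlt
    cases hd : arr.drop m with
    | nil =>
      have hm : arr.length ≤ m := by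
        have := congrArg List.length hd
        simp at this
        omega
      simp only [pvOuterB]
      rw [if_neg (by simp only [PySem.List.len_eq]; push_cast; omega)]
      simp [pvAltS]
    | cons a tl =>
      obtain ⟨ha, htl, hm⟩ := pvDropCons arr m a tl hd
      have hk := pvRunB_eq arr m a tl hd arr.length 1 (by omega)
      rw [htl] at hk
      set k := pvRunB arr (m : Int) arr.length 1 with hkdef
      have hk1 : 1 ≤ k := pvRunB_ge arr (m : Int) arr.length 1
      simp only [pvOuterB]
      rw [if_pos (by simp only [PySem.List.len_eq]; push_cast; omega), ← hkdef]
      have hgm : PySem.List.pyGetD arr (m : Int) 0 = a := by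
        rw [PySem.List.pyGetD_natCast]; exact ha
      have hcast : (m : Int) + (k : Nat) = ((m + k : Nat) : Int) := by push_cast; ring
      rw [hcast, ih (m + k) _ (by omega)]
      have hdrop : arr.drop (m + k) = tl.drop (k - 1) := by
        have h2 : arr.drop (m + k) = (arr.drop (m + 1)).drop (k - 1) := by
          rw [List.drop_drop]; congr 1; omega
        rw [h2, htl]
      rw [hdrop, pvAltS_cons, ← hk, hgm]
      simp

-- pvF spelled as a head run plus the rest, measured by pvRun
lemma pvL3 (n : Nat)
    (H : ∀ (l : List Int) (x : Int), l.length < n → pvF x x l = pvAltS (x :: l)) :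
    ∀ (tl : List Int) (cur : Int) (j : Nat), tl.length ≤ n →
      pvF cur (cur + (j : Int)) tl
        = pvFmt (cur, cur + (pvRun cur (j + 1) tl : Int) - 1)
          :: pvAltS (tl.drop (pvRun cur (j + 1) tl - (j + 1))) := by
  intro tl
  induction tl with
  | nil =>
    intro cur j _
    simp only [pvF, pvRun, List.drop_nil, pvAltS]
    have : cur + ((j + 1 : Nat) : Int) - 1 = cur + (j : Int) := by push_cast; ring
    rw [this]
  | cons x tl ih =>
    intro cur j hlen
    have hlen' : tl.length < n := by simp at hlen; omega
    simp only [pvF, pvRun]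
    by_cases hx : x = cur + (j : Int) + 1
    · have hx' : x = cur + ((j + 1 : Nat) : Int) := by rw [hx]; push_cast; ring
      rw [if_pos hx, if_pos (by exact_mod_cast hx')]
      have := ih cur (j + 1) hlen'.le
      rw [hx']
      rw [this]
      have hge := pvRun_ge cur tl (j + 1 + 1)
      have hdrop : ((cur + ((j + 1 : Nat) : Int)) :: tl).drop (pvRun cur (j + 1 + 1) tl - (j + 1))
          = tl.drop (pvRun cur (j + 1 + 1) tl - (j + 2)) := by
        rw [show pvRun cur (j + 1 + 1) tl - (j + 1)
              = (pvRun cur (j + 1 + 1) tl - (j + 2)) + 1 from by omega,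
            List.drop_succ_cons]
      rw [hdrop]
    · have hx' : ¬ x = cur + ((j + 1 : Nat) : Int) := by
        intro hh; apply hx; rw [hh]; push_cast; ring
      rw [if_neg hx, if_neg (by exact_mod_cast hx')]
      have : cur + ((j + 1 : Nat) : Int) - 1 = cur + (j : Int) := by push_cast; ring
      rw [this, Nat.sub_self, List.drop_zero]
      rw [H tl x hlen']

-- pvF equals pvAltS
lemma pvM : ∀ (n : Nat) (tl : List Int) (a : Int), tl.length ≤ n →
    pvF a a tl = pvAltS (a :: tl) := by
  intro n
  induction n using Nat.strong_induction_on with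
  | _ n ihn =>
    intro tl a hle
    have H : ∀ (l : List Int) (x : Int), l.length < tl.length →
        pvF x x l = pvAltS (x :: l) := by
      intro l x hl
      exact ihn l.length (by omega) l x (le_refl _)
    have h3 := pvL3 tl.length H tl a 0 (le_refl _)
    have ha0 : a + ((0 : Nat) : Int) = a := by simp
    rw [ha0] at h3
    rw [h3, pvAltS_cons]
    set k := pvRun a 1 tl with hk
    have hk1 : 1 ≤ k := pvRun_ge a tl 1
    congr 1
    by_cases hke : k = 1
    · simp [pvFmt, hke]
    · have : ¬ a = a + (k : Int) - 1 := by
        intro hh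
        have : (k : Int) = 1 := by omega
        exact hke (by exact_mod_cast this)
      simp [pvFmt, hke, this]

-- ===== VERDICT (by name: the statement is the Claim_ definition above) =====
theorem smallest_ranges_spec : Claim_equal_smallest_ranges := by
  intro arr _
  unfold Spec_smallest_ranges
  cases arr with
  | nil =>
    rw [smallest_ranges_alt]
    simp [smallest_ranges, pvOuterB]
  | cons a tl =>
    unfold smallest_ranges
    have hne : (PySem.List.len (a :: tl) == 0) = false := by
      simp only [PySem.List.len_eq, List.length_cons, beq_eq_false_iff_ne, ne_eq]
      push_cast; omega
    rw [hne]
    simp only [Bool.false_eq_true, if_false, PySem.List.pyGetD_zero_cons]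
    rw [pvBridge a tl]
    have hlast : PySem.List.pyGetD (a :: tl) (PySem.List.len (a :: tl) - 1) 0
        = pvLast a tl := by
      rw [show PySem.List.len (a :: tl) - 1 = ((tl.length : Nat) : Int) from by simp]
      rw [PySem.List.pyGetD_natCast]
      exact pvLast_getD tl a
    rw [hlast]
    have halt : smallest_ranges_alt (a :: tl) = pvAltS (a :: tl) := by
      rw [smallest_ranges_alt,
          show (0 : Int) = ((0 : Nat) : Int) from by simp,
          pvOuterB_eq (a :: tl) ((a :: tl).length + 1) 0 [] (by omega)]
      simp
    rw [halt, ← pvM tl.length tl a (le_refl _)]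
    have hf := pvFoldF tl a a []
    simp only [List.nil_append] at hf
    rw [← hf]
    by_cases h : ((pvPairs a tl).foldl pvPairStepA ([], a + 1, a)).2.2 = pvLast a tl
    · simp [pvFmt, h]
    · simp [pvFmt, h, Ne.symm h]
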